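-- pv_equiv track=rewrite | github.com/jmcduffie32/aoc-2023 | day14.py | row_load
-- ===== SOURCE A (Python) =====
-- def row_load(line):
--     max_load = len(line)
--     current_load = max_load
--     result = 0
--     for i, symbol in enumerate(line):
--         if symbol == "O":
--             result += current_load
--             current_load -= 1
--         elif symbol == "#":
--             current_load = max_load - (i + 1)
--
--     return result
-- ===== SOURCE B (Python) =====
-- def row_load(line):
--     n = len(line)
--     result = 0
--     offset = 0
--     for seg in line.split('#'):
--         c = seg.count('O')
--         result += c * (n - offset) - c * (c - 1) // 2
--         offset += len(seg) + 1
--     return result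
-- ===== Notes on version B (the rewrite author's own statement) =====
-- stated objective: faster
-- what changed: Replaces A's per-character loop with a decrementing load counter by splitting the line at wall characters and adding, per segment, a closed-form arithmetic-series sum c*(n-offset) - c*(c-1)//2 over its rock count c.
import Mathlib
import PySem

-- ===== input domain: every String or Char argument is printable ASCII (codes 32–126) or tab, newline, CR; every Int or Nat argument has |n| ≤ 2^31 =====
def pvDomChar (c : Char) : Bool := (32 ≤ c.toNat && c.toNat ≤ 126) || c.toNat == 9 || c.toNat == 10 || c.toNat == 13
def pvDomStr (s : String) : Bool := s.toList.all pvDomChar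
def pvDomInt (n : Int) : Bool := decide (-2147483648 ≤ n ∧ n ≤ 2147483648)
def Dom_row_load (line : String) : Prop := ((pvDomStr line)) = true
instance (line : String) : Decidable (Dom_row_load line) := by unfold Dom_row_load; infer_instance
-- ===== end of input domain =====

-- B replaces A's per-character decrementing-counter loop by a segment-wise pass over
-- line.split('#') with a closed-form arithmetic-series sum per segment (objective: faster by a constant factor).

-- ===== PORT A =====
def row_load (line : String) : Int :=
  let maxLoad : Int := PySem.Str.len line
  ((PySem.List.enumerate line.toList).foldl
    (fun (st : Int × Int) (p : Int × Char) =>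
      if p.2 = 'O' then (st.1 - 1, st.2 + st.1)
      else if p.2 = '#' then (maxLoad - (p.1 + 1), st.2)
      else st)
    (maxLoad, 0)).2

-- ===== PORT B =====
def row_load_alt (line : String) : Int :=
  let n : Int := PySem.Str.len line
  ((PySem.Chars.splitOn line.toList ['#']).foldl
    (fun (st : Int × Int) (seg : List Char) =>
      let c : Int := PySem.Chars.count seg ['O']
      (st.1 + (c * (n - st.2) - PySem.Int.floordiv (c * (c - 1)) 2),
       st.2 + seg.length + 1))
    (0, 0)).1

-- ===== PRECONDITION & SPEC =====
def Spec_row_load (line : String) (out : Int) : Prop := out = row_load_alt line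
instance (line : String) (out : Int) : Decidable (Spec_row_load line out) := by unfold Spec_row_load; infer_instance

-- ===== CLAIM (what is proved, stated in full; the proofs are below) =====
def Claim_equal_row_load : Prop := ∀ (line : String), Dom_row_load line → Spec_row_load line (row_load line)

-- ===== LEMMAS AND PROOFS =====

-- A's loop as a structural recursion over the characters (i = current index, cl = current_load, r = result)
def pvLoopA (n : Int) : List Char → Int → Int → Int → Int
  | [], _, _, r => r
  | c :: t, i, cl, r =>
    if c = 'O' then pvLoopA n t (i + 1) (cl - 1) (r + cl)
    else if c = '#' then pvLoopA n t (i + 1) (n - (i + 1)) r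
    else pvLoopA n t (i + 1) cl r

-- triangle numbers: pvT c = 0 + 1 + … + (c-1)
def pvT : Nat → Int
  | 0 => 0
  | c + 1 => pvT c + c

-- splitting on '#', structurally
def pvConsHead (x : List Char) : List (List Char) → List (List Char)
  | [] => [x]
  | s :: ss => (x ++ s) :: ss

def pvSplit : List Char → List (List Char)
  | [] => [[]]
  | c :: t => if c = '#' then [] :: pvSplit t else pvConsHead [c] (pvSplit t)

def pvJoin : List (List Char) → List Char
  | [] => []
  | [s] => s
  | s :: ss => s ++ '#' :: pvJoin ss

-- B's loop as a structural recursion over the segments (off = offset, r = result)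
def pvLoopB (n : Int) : List (List Char) → Int → Int → Int
  | [], _, r => r
  | seg :: ss, off, r =>
      pvLoopB n ss (off + seg.length + 1) (r + (seg.count 'O' : Int) * (n - off) - pvT (seg.count 'O'))

theorem pvFoldA_eq (n : Int) (l : List Char) : ∀ (i cl r : Int),
    ((PySem.List.enumerate l i).foldl
      (fun (st : Int × Int) (p : Int × Char) =>
        if p.2 = 'O' then (st.1 - 1, st.2 + st.1)
        else if p.2 = '#' then (n - (p.1 + 1), st.2)
        else st)
      (cl, r)).2 = pvLoopA n l i cl r := by
  induction l with
  | nil => intro i cl r; simp [PySem.List.enumerate_nil, pvLoopA]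
  | cons c t ih =>
    intro i cl r
    rw [PySem.List.enumerate_cons]
    simp only [List.foldl_cons, pvLoopA]
    by_cases hO : c = 'O' <;> by_cases hH : c = '#' <;> simp [hO, hH, ih]

theorem pvCount_go (l : List Char) : ∀ (fuel acc : Nat), l.length ≤ fuel →
    PySem.Chars.count.go ['O'] fuel l acc = acc + l.count 'O' := by
  induction l with
  | nil => intro fuel acc _; cases fuel <;> simp [PySem.Chars.count.go]
  | cons c t ih =>
    intro fuel acc h
    cases fuel with
    | zero => simp at h
    | succ f =>
      have hlen : t.length ≤ f := by simpa using h
      simp only [PySem.Chars.count.go, List.isPrefixOf, Bool.and_true,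
        List.length_cons, List.length_nil, List.drop_succ_cons, List.drop_zero]
      by_cases hc : 'O' = c
      · rw [if_pos (by simpa using hc), ih f (acc + 1) hlen]
        subst hc
        simp
        omega
      · rw [if_neg (by simp [hc]), ih f acc hlen]
        have : (c == 'O') = false := by simp; exact fun h' => hc h'.symm
        simp [List.count_cons, this]
theorem pvCount_char (l : List Char) : PySem.Chars.count l ['O'] = l.count 'O' := by
  unfold PySem.Chars.count
  simp only [List.isEmpty_cons, if_false, Bool.false_eq_true]
  rw [pvCount_go l l.length 0 (le_refl _)]; omega

theorem pvT_floordiv (c : Nat) :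
    PySem.Int.floordiv ((c : Int) * ((c : Int) - 1)) 2 = pvT c := by
  induction c with
  | zero => decide
  | succ c ih =>
    have e1 : ((c + 1 : Nat) : Int) * (((c + 1 : Nat) : Int) - 1)
        = (c : Int) * ((c : Int) - 1) + 2 * c := by push_cast; ring
    obtain ⟨t, ht⟩ : Even ((c : Int) * ((c : Int) - 1)) := by
      have h := Int.even_mul_succ_self ((c : Int) - 1)
      simpa [mul_comm] using h
    rw [e1, PySem.Int.floordiv_eq_ediv_of_pos (by norm_num)]
    rw [PySem.Int.floordiv_eq_ediv_of_pos (by norm_num)] at ih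
    show _ = pvT c + (c : Int)
    rw [← ih, ht]
    omega

theorem pvSplit_ne_nil (l : List Char) : pvSplit l ≠ [] := by
  cases l with
  | nil => simp [pvSplit]
  | cons c t =>
    simp only [pvSplit]
    split
    · simp
    · cases h : pvSplit t <;> simp [pvConsHead]

theorem pvSplit_go (l : List Char) : ∀ (fuel : Nat) (cur : List Char) (acc : List (List Char)),
    l.length ≤ fuel →
    PySem.Chars.splitOn.go ['#'] fuel l cur acc
      = acc.reverse ++ pvConsHead cur.reverse (pvSplit l) := by
  induction l with
  | nil =>
    intro fuel cur acc _
    cases fuel <;> simp [PySem.Chars.splitOn.go, pvSplit, pvConsHead]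
  | cons c t ih =>
    intro fuel cur acc h
    cases fuel with
    | zero => simp at h
    | succ f =>
      have hlen : t.length ≤ f := by simpa using h
      simp only [PySem.Chars.splitOn.go, List.isPrefixOf, Bool.and_true,
        List.length_cons, List.length_nil, List.drop_succ_cons, List.drop_zero]
      by_cases hc : '#' = c
      · rw [if_pos (by simpa using hc), ih f [] (cur.reverse :: acc) hlen]
        subst hc
        cases hS : pvSplit t with
        | nil => exact absurd hS (pvSplit_ne_nil t)
        | cons u us => simp [pvSplit, pvConsHead, hS]
      · rw [if_neg (by simp [hc]), ih f (c :: cur) acc hlen]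
        have hc' : ¬ c = '#' := fun h' => hc h'.symm
        cases hS : pvSplit t with
        | nil => exact absurd hS (pvSplit_ne_nil t)
        | cons u us => simp [pvSplit, pvConsHead, hS, hc']
theorem pvSplitOn_hash (l : List Char) : PySem.Chars.splitOn l ['#'] = pvSplit l := by
  unfold PySem.Chars.splitOn
  rw [pvSplit_go l (l.length + 1) [] [] (by omega)]
  cases hS : pvSplit l with
  | nil => exact absurd hS (pvSplit_ne_nil l)
  | cons u us => simp [pvConsHead]

theorem pvJoin_split (l : List Char) : pvJoin (pvSplit l) = l := by
  induction l with
  | nil => simp [pvSplit, pvJoin]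
  | cons c t ih =>
    simp only [pvSplit]
    by_cases hc : c = '#'
    · subst hc
      simp only [if_true]
      cases hS : pvSplit t with
      | nil => exact absurd hS (pvSplit_ne_nil t)
      | cons u us =>
        rw [hS] at ih
        simp [pvJoin, ih]
    · simp only [hc, if_false]
      cases hS : pvSplit t with
      | nil => exact absurd hS (pvSplit_ne_nil t)
      | cons u us =>
        rw [hS] at ih
        cases us with
        | nil => simpa [pvConsHead, pvJoin] using congrArg (c :: ·) ih
        | cons v vs => simpa [pvConsHead, pvJoin] using congrArg (c :: ·) ih

theorem pvSplit_hash_free (l : List Char) : ∀ s ∈ pvSplit l, '#' ∉ s := by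
  induction l with
  | nil => intro s hs; simp [pvSplit] at hs; simp [hs]
  | cons c t ih =>
    intro s hs
    simp only [pvSplit] at hs
    by_cases hc : c = '#'
    · simp only [hc, if_true, List.mem_cons] at hs
      rcases hs with h | h
      · simp [h]
      · exact ih s h
    · simp only [hc, if_false] at hs
      cases hS : pvSplit t with
      | nil => exact absurd hS (pvSplit_ne_nil t)
      | cons u us =>
        rw [hS] at hs
        simp only [pvConsHead, List.mem_cons] at hs
        rcases hs with h | h
        · subst h
          intro hm
          rcases List.mem_cons.mp hm with h' | h'
          · exact hc h'.symm
          · exact ih u (by rw [hS]; exact List.mem_cons_self) h'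
        · exact ih s (by rw [hS]; exact List.mem_cons.mpr (Or.inr h))

theorem pvSeg_run (n : Int) (seg : List Char) (hf : '#' ∉ seg) :
    ∀ (rest : List Char) (i cl r : Int),
    pvLoopA n (seg ++ rest) i cl r
      = pvLoopA n rest (i + seg.length) (cl - seg.count 'O')
          (r + (seg.count 'O' : Int) * cl - pvT (seg.count 'O')) := by
  induction seg with
  | nil => intro rest i cl r; simp [pvT]
  | cons c t ih =>
    have hc : c ≠ '#' := fun h => hf (by simp [h])
    have hf' : '#' ∉ t := fun h => hf (List.mem_cons.mpr (Or.inr h))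
    intro rest i cl r
    by_cases hO : c = 'O'
    · subst hO
      simp only [List.cons_append, pvLoopA, if_true]
      rw [ih hf' rest (i + 1) (cl - 1) (r + cl)]
      have hcnt : ('O' :: t).count 'O' = t.count 'O' + 1 := by simp
      rw [hcnt]
      have hT : pvT (t.count 'O' + 1) = pvT (t.count 'O') + t.count 'O' := rfl
      rw [hT]
      congr 1 <;> push_cast [List.length_cons] <;> ring
    · simp only [List.cons_append, pvLoopA, hO, hc, if_false]
      rw [ih hf' rest (i + 1) cl r]
      have hcnt : (c :: t).count 'O' = t.count 'O' := by simp [hO]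
      rw [hcnt]
      congr 1 <;> push_cast [List.length_cons] <;> ring

theorem pvMain (n : Int) : ∀ (segs : List (List Char)), (∀ s ∈ segs, '#' ∉ s) →
    ∀ (i r : Int), pvLoopA n (pvJoin segs) i (n - i) r = pvLoopB n segs i r := by
  intro segs
  induction segs with
  | nil => intro _ i r; simp [pvJoin, pvLoopA, pvLoopB]
  | cons s ss ih =>
    intro hfree i r
    have hs : '#' ∉ s := hfree s List.mem_cons_self
    have hss : ∀ u ∈ ss, '#' ∉ u := fun u hu => hfree u (List.mem_cons.mpr (Or.inr hu))
    cases ss with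
    | nil =>
      show pvLoopA n (pvJoin [s]) i (n - i) r = _
      simp only [pvJoin, pvLoopB]
      rw [show s = s ++ ([] : List Char) by simp, pvSeg_run n s hs [] i (n - i) r]
      simp [pvLoopA]
    | cons s2 ss2 =>
      show pvLoopA n (s ++ '#' :: pvJoin (s2 :: ss2)) i (n - i) r = _
      rw [pvSeg_run n s hs ('#' :: pvJoin (s2 :: ss2)) i (n - i) r]
      have hstep : pvLoopA n ('#' :: pvJoin (s2 :: ss2)) (i + s.length)
            (n - i - s.count 'O') (r + (s.count 'O' : Int) * (n - i) - pvT (s.count 'O'))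
          = pvLoopA n (pvJoin (s2 :: ss2)) (i + s.length + 1) (n - (i + s.length + 1))
            (r + (s.count 'O' : Int) * (n - i) - pvT (s.count 'O')) := by
        simp [pvLoopA]
      rw [hstep, ih hss (i + s.length + 1)
        (r + (s.count 'O' : Int) * (n - i) - pvT (s.count 'O'))]
      rfl

theorem pvFoldB_eq (n : Int) : ∀ (segs : List (List Char)) (r off : Int),
    (segs.foldl
      (fun (st : Int × Int) (seg : List Char) =>
        let c : Int := PySem.Chars.count seg ['O']
        (st.1 + (c * (n - st.2) - PySem.Int.floordiv (c * (c - 1)) 2),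
         st.2 + seg.length + 1))
      (r, off)).1 = pvLoopB n segs off r := by
  intro segs
  induction segs with
  | nil => intro r off; simp [pvLoopB]
  | cons s ss ih =>
    intro r off
    simp only [List.foldl_cons, pvLoopB]
    rw [ih]
    congr 1
    rw [pvCount_char]
    rw [show ((s.count 'O' : Int) * ((s.count 'O' : Int) - 1)) = ((s.count 'O' : Nat) : Int) * (((s.count 'O' : Nat) : Int) - 1) by norm_cast]
    rw [pvT_floordiv]
    ring

-- ===== VERDICT (by name: the statement is the Claim_ definition above) =====
theorem row_load_spec : Claim_equal_row_load := by
  intro line _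
  unfold Spec_row_load row_load row_load_alt
  simp only [PySem.Str.len_eq]
  rw [pvFoldA_eq, pvFoldB_eq, pvSplitOn_hash]
  have h := pvMain (line.toList.length : Int) (pvSplit line.toList)
    (pvSplit_hash_free line.toList) 0 0
  rw [pvJoin_split] at h
  simpa using h
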